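-- pv_equiv track=rewrite | github.com/eneselhan/Mukabele-Bot | src/services/alignment_service.py | _find_first_token_span
-- ===== SOURCE A (Python) =====
-- from typing import Dict, Any, List, Optional, Tuple
--
-- def _find_first_token_span(haystack: List[str], needle: List[str]) -> Optional[Tuple[int, int]]:
--     """Return (start, end_exclusive) for first exact token-sequence match, else None."""
--     if not haystack or not needle:
--         return None
--     n = len(needle)
--     if n > len(haystack):
--         return None
--     for i in range(0, len(haystack) - n + 1):
--         if haystack[i : i + n] == needle:
--             return (i, i + n)
--     return None
-- ===== SOURCE B (Python) =====
-- def _find_first_token_span(haystack, needle):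
--     """Return (start, end_exclusive) for first exact token-sequence match, else None."""
--     if not haystack or not needle:
--         return None
--     n = len(needle)
--     window = []
--     for i, tok in enumerate(haystack):
--         window.append(tok)
--         if len(window) > n:
--             window.pop(0)
--         if len(window) == n and window == needle:
--             return (i - n + 1, i + 1)
--     return None
-- ===== Notes on version B (the rewrite author's own statement) =====
-- stated objective: alternative
-- what changed: Replaces the index loop with per-candidate slicing haystack[i:i+n]==needle by a single enumerate pass that maintains a sliding window list of the last n tokens and compares it to the needle.
import Mathlib
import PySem

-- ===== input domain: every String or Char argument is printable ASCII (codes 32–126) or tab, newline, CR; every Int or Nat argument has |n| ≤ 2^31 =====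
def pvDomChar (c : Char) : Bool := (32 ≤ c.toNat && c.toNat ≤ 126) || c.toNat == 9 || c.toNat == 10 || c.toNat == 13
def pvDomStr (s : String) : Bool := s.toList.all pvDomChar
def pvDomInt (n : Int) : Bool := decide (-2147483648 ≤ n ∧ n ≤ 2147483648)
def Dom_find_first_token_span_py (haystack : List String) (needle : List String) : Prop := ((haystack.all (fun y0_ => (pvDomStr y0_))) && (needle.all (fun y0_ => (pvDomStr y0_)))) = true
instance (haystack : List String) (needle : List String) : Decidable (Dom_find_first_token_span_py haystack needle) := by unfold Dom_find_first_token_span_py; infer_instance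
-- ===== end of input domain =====

-- B replaces A's index loop with per-candidate slicing by a single enumerate pass
-- maintaining a sliding window of the last n tokens (alternative decomposition, same cost).


-- ===== PORT A =====
-- literal transliteration of A: early-exit loop over i in range(0, len(h)-n+1)
-- testing haystack[i:i+n] == needle (for-with-return = findSome?).
def find_first_token_span_py (haystack : List String) (needle : List String) : Option (Int × Int) :=
  if haystack = [] ∨ needle = [] then none
  else
    let n : Int := needle.length
    if n > (haystack.length : Int) then none
    else
      (PySem.List.pyRange 0 ((haystack.length : Int) - n + 1) 1).findSome? (fun i =>
        if PySem.List.slice haystack (some i) (some (i + n)) = needle then some (i, i + n) else none)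

-- ===== PORT B =====
-- literal transliteration of B's enumerate loop: window.append(tok);
-- if len(window) > n: window.pop(0)  (= tail); compare window to needle.
def altGo (needle : List String) (n : Nat) : List (Int × String) → List String → Option (Int × Int)
  | [], _ => none
  | (i, tok) :: rest, window =>
    let w1 := window ++ [tok]
    let w2 := if n < w1.length then w1.tail else w1
    if w2.length = n ∧ w2 = needle then some (i - (n : Int) + 1, i + 1)
    else altGo needle n rest w2

def find_first_token_span_py_alt (haystack : List String) (needle : List String) : Option (Int × Int) :=
  if haystack = [] ∨ needle = [] then none
  else altGo needle needle.length (PySem.List.enumerate haystack 0) []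

-- ===== PRECONDITION & SPEC =====
def Spec_find_first_token_span_py (haystack : List String) (needle : List String) (out : Option (Int × Int)) : Prop := out = find_first_token_span_py_alt haystack needle
instance (haystack : List String) (needle : List String) (out : Option (Int × Int)) : Decidable (Spec_find_first_token_span_py haystack needle out) := by unfold Spec_find_first_token_span_py; infer_instance

-- ===== CLAIM (what is proved, stated in full; the proofs are below) =====
def Claim_equal_find_first_token_span_py : Prop := ∀ (haystack : List String) (needle : List String), Dom_find_first_token_span_py haystack needle → Spec_find_first_token_span_py haystack needle (find_first_token_span_py haystack needle)

-- ===== LEMMAS AND PROOFS =====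

-- reference search: first start j with the n tokens from j matching the needle
def naiveGo (needle : List String) (n : Nat) : List String → Int → Option (Int × Int)
  | [], _ => none
  | x :: rest, j =>
    if (x :: rest).length < n then none
    else if (x :: rest).take n = needle then some (j, j + n)
    else naiveGo needle n rest (j + 1)

lemma naive_none (nd : List String) (n : Nat) (s : List String) (j : Int)
    (h : s.length < n) : naiveGo nd n s j = none := by
  cases s with
  | nil => rfl
  | cons x rest => rw [naiveGo, if_pos h]

lemma naive_step (nd : List String) (n : Nat) (s : List String) (j : Int)
    (hn : 1 ≤ n) (h : n ≤ s.length) :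
    naiveGo nd n s j = if s.take n = nd then some (j, j + n) else naiveGo nd n s.tail (j + 1) := by
  cases s with
  | nil => simp at h; omega
  | cons x rest =>
    rw [naiveGo, if_neg (by omega)]
    rfl

-- A equals the reference search (given 1 ≤ n)
lemma a_eq_naive (h nd : List String) (hn : 1 ≤ nd.length) :
    ∀ (s : List String) (j : Nat), s = h.drop j →
      (PySem.List.pyRange (j : Int) ((h.length : Int) - nd.length + 1) 1).findSome? (fun i =>
        if PySem.List.slice h (some i) (some (i + nd.length)) = nd then some (i, i + nd.length) else none)
      = naiveGo nd nd.length s (j : Int) := by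
  intro s
  induction s with
  | nil =>
    intro j hs
    have hj : h.length ≤ j := List.drop_eq_nil_iff.mp hs.symm
    rw [PySem.List.pyRange_one_eq_nil (by omega)]
    rfl
  | cons x rest ih =>
    intro j hs
    have hjL : j < h.length := by
      by_contra hc
      have hnil : h.drop j = [] := List.drop_eq_nil_iff.mpr (by omega)
      rw [hnil] at hs; exact List.cons_ne_nil _ _ hs
    have hlen : (x :: rest).length = h.length - j := by rw [hs]; simp
    have hrest : rest = h.drop (j + 1) := by
      have : (x :: rest).tail = (h.drop j).tail := by rw [hs]
      simpa [List.tail_drop] using this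
    by_cases hcase : j + nd.length ≤ h.length
    · rw [PySem.List.pyRange_one_cons (by omega), List.findSome?_cons]
      have hsl : PySem.List.slice h (some (j : Int)) (some ((j : Int) + (nd.length : Int)))
          = (h.drop j).take nd.length := PySem.List.slice_natCast_add ..
      rw [hsl, ← hs]
      rw [naive_step nd _ _ _ hn (by omega)]
      by_cases hm : (x :: rest).take nd.length = nd
      · simp [hm]
      · simp only [hm, if_false, List.tail_cons]
        have := ih (j + 1) hrest
        push_cast at this
        simpa using this
    · rw [PySem.List.pyRange_one_eq_nil (by omega),
        naive_none nd _ _ _ (by omega)]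
      rfl

-- B equals the reference search: the window after m tokens is (h.take m).drop (m - n)
lemma b_eq_naive (h nd : List String) (hn : 1 ≤ nd.length) :
    ∀ (s : List String) (k : Nat), s = h.drop k →
      altGo nd nd.length (PySem.List.enumerate s (k : Int)) ((h.take k).drop (k - nd.length))
      = naiveGo nd nd.length (h.drop (k + 1 - nd.length)) ((k + 1 - nd.length : Nat) : Int) := by
  intro s
  induction s with
  | nil =>
    intro k hs
    have hk : h.length ≤ k := List.drop_eq_nil_iff.mp hs.symm
    rw [PySem.List.enumerate_nil, naive_none nd _ _ _ (by simp; omega)]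
    rfl
  | cons x rest ih =>
    intro k hs
    have hkL : k < h.length := by
      by_contra hc
      have hnil : h.drop k = [] := List.drop_eq_nil_iff.mpr (by omega)
      rw [hnil] at hs; exact List.cons_ne_nil _ _ hs
    have hrest : rest = h.drop (k + 1) := by
      have : (x :: rest).tail = (h.drop k).tail := by rw [hs]
      simpa [List.tail_drop] using this
    have hxk : h[k]? = some x := by
      have : (h.drop k)[0]? = some x := by rw [← hs]; rfl
      simpa [List.getElem?_drop] using this
    have htk : h.take (k + 1) = h.take k ++ [x] := by
      rw [List.take_add_one, hxk]; rfl
    have hw1 : (h.take k).drop (k - nd.length) ++ [x] = (h.take (k + 1)).drop (k - nd.length) := by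
      rw [htk, List.drop_append_of_le_length (by simp; omega)]
    have hlen1 : ((h.take (k + 1)).drop (k - nd.length)).length = (k + 1) - (k - nd.length) := by
      simp; omega
    have hw2 : (if nd.length < ((h.take k).drop (k - nd.length) ++ [x]).length
          then ((h.take k).drop (k - nd.length) ++ [x]).tail
          else (h.take k).drop (k - nd.length) ++ [x])
        = (h.take (k + 1)).drop (k + 1 - nd.length) := by
      rw [hw1]
      by_cases hkn : nd.length ≤ k
      · rw [if_pos (by omega), List.tail_drop]
        congr 1; omega
      · rw [if_neg (by omega)]
        congr 1; omega
    have hlen2 : ((h.take (k + 1)).drop (k + 1 - nd.length)).length = (k + 1) - (k + 1 - nd.length) := by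
      simp; omega
    rw [PySem.List.enumerate_cons, altGo, hw2]
    by_cases hbig : nd.length ≤ k + 1
    · -- the window is full: the check is exactly the naive check at start k+1-n
      have hwnd : (h.take (k + 1)).drop (k + 1 - nd.length)
          = (h.drop (k + 1 - nd.length)).take nd.length := by
        rw [List.drop_take]; congr 1; omega
      rw [naive_step nd _ _ _ hn (by simp; omega)]
      by_cases hm : (h.drop (k + 1 - nd.length)).take nd.length = nd
      · rw [if_pos ⟨by omega, by rw [hwnd]; exact hm⟩, if_pos hm]
        simp only [Option.some.injEq, Prod.mk.injEq]
        constructor <;> omega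
      · rw [if_neg (by rw [hwnd]; exact fun hc => hm hc.2), if_neg hm, List.tail_drop]
        have hiv := ih (k + 1) hrest
        have e1 : ((k : Int) + 1) = ((k + 1 : Nat) : Int) := by omega
        have e2 : k + 1 - nd.length + 1 = k + 1 + 1 - nd.length := by omega
        have e3 : ((k + 1 - nd.length : Nat) : Int) + 1 = ((k + 1 + 1 - nd.length : Nat) : Int) := by omega
        rw [e1, e2, e3, hiv]
    · -- window not yet full: the length test fails and both sides stay at start 0
      rw [if_neg (fun hc => absurd (hlen2 ▸ hc.1) (by omega))]
      have hiv := ih (k + 1) hrest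
      have e1 : ((k : Int) + 1) = ((k + 1 : Nat) : Int) := by omega
      have e2 : k + 1 - nd.length = 0 := by omega
      have e3 : k + 1 + 1 - nd.length = 0 := by omega
      rw [e1, hiv, e2, e3]

-- ===== VERDICT (by name: the statement is the Claim_ definition above) =====
theorem find_first_token_span_py_spec : Claim_equal_find_first_token_span_py := by
  intro h nd _
  unfold Spec_find_first_token_span_py find_first_token_span_py find_first_token_span_py_alt
  by_cases hemp : h = [] ∨ nd = []
  · simp [hemp]
  · simp only [hemp, if_false]
    rw [not_or] at hemp
    have hn : 1 ≤ nd.length := List.length_pos_of_ne_nil hemp.2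
    have hb := b_eq_naive h nd hn h 0 (by simp)
    simp only [List.drop_zero, List.take_zero, Nat.zero_sub, Nat.cast_zero] at hb
    have h1n : 1 - nd.length = 0 := by omega
    rw [h1n] at hb
    simp only [List.drop_zero, Nat.cast_zero] at hb
    rw [hb]
    by_cases hlen : (nd.length : Int) > (h.length : Int)
    · -- n > len(h): A returns none before the loop; naive returns none since length < n
      simp only [hlen, if_true]
      cases h with
      | nil => simp [naiveGo]
      | cons x rest =>
        rw [naiveGo]
        have : (x :: rest).length < nd.length := by
          have := hlen; push_cast at this; omega
        rw [if_pos this]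
    · simp only [hlen, if_false]
      have ha := a_eq_naive h nd hn h 0 (by simp)
      simpa using ha
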